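-- pv_equiv track=rewrite | github.com/catsanzsh/TeamFlamesSMB3Clone | protov0.py | build_sprite_palette
-- ===== SOURCE A (Python) =====
-- TRANSPARENT_CHAR = 'T'
--
-- color_map = {
--     'R': (224, 0, 0),      # Red (Mario-like hat/shirt)
--     'B': (0, 100, 224),    # Blue (Mario-like overalls)
--     'Y': (255, 255, 0),    # Yellow (Coins, Stars, Q-Block)
--     'G': (0, 160, 0),      # Green (Pipes, Koopas, bushes)
--     'W': (255, 255, 255),  # White (Eyes, highlights, text)
--     'K': (0, 0, 0),        # Black (Outlines, pupils)
--     'S': (255, 184, 152),  # Skin-tone (Mario-like face/hands)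
--     'N': (160, 82, 45),    # Brown (Blocks, ground, Goomba body)
--     'n': (120, 60, 30),    # Darker Brown (Block shadows, Goomba feet)
--     'O': (255, 165, 0),    # Orange (Brick blocks)
--     'o': (220, 120, 0),    # Darker Orange (Brick block shadows)
--     'C': (90, 200, 255),   # Cyan/Sky Blue (Background)
--     'M': (200, 70, 70),    # Mushroom Red Cap
--     'F': (255, 100, 0),    # Fire Flower Orange
--     'L': (100, 200, 50),   # Super Leaf Green
--     'X': (150, 150, 150),  # Grey (Used blocks, castle blocks)
--     'D': (50, 50, 50),     # Dark Grey / Shadow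
--     'E': (230, 230, 50),   # Light Yellow (Star shine)
--     TRANSPARENT_CHAR: (1, 2, 3, 0) # Special placeholder for transparency
-- }
--
-- def build_sprite_palette(pixel_art_rows):
--     """Creates a palette for a sprite, ensuring TRANSPARENT_CHAR's color is palette[0]."""
--     palette = [color_map[TRANSPARENT_CHAR]]
--     unique_colors_in_art = set()
--     for row_str in pixel_art_rows:
--         for char_code in row_str:
--             if char_code != TRANSPARENT_CHAR and char_code in color_map:
--                 unique_colors_in_art.add(color_map[char_code])
--     for color in sorted(list(unique_colors_in_art), key=lambda c: (c[0],c[1],c[2])):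
--         if color not in palette:
--             palette.append(color)
--     return palette # This is already a list of RGB tuples, suitable for Pygame
-- ===== SOURCE B (Python) =====
-- TRANSPARENT_CHAR = 'T'
--
-- color_map = {
--     'R': (224, 0, 0),
--     'B': (0, 100, 224),
--     'Y': (255, 255, 0),
--     'G': (0, 160, 0),
--     'W': (255, 255, 255),
--     'K': (0, 0, 0),
--     'S': (255, 184, 152),
--     'N': (160, 82, 45),
--     'n': (120, 60, 30),
--     'O': (255, 165, 0),
--     'o': (220, 120, 0),
--     'C': (90, 200, 255),
--     'M': (200, 70, 70),
--     'F': (255, 100, 0),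
--     'L': (100, 200, 50),
--     'X': (150, 150, 150),
--     'D': (50, 50, 50),
--     'E': (230, 230, 50),
--     TRANSPARENT_CHAR: (1, 2, 3, 0)
-- }
--
-- def _insert_unique(sorted_colors, col):
--     """Insert col into an ascending, duplicate-free list of colors, keeping it so."""
--     if not sorted_colors:
--         return [col]
--     head = sorted_colors[0]
--     if col < head:
--         return [col] + sorted_colors
--     if col == head:
--         return sorted_colors
--     return [head] + _insert_unique(sorted_colors[1:], col)
--
-- def build_sprite_palette(pixel_art_rows):
--     """Creates a palette for a sprite, ensuring TRANSPARENT_CHAR's color is palette[0]."""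
--     tail = []
--     for row_str in pixel_art_rows:
--         for char_code in row_str:
--             if char_code != TRANSPARENT_CHAR and char_code in color_map:
--                 tail = _insert_unique(tail, color_map[char_code])
--     return [color_map[TRANSPARENT_CHAR]] + tail
-- ===== Notes on version B (the rewrite author's own statement) =====
-- stated objective: alternative
-- what changed: B never builds a set and never calls sort: it maintains the palette tail as an ascending duplicate-free list and performs an online ordered insertion (with equality skip) for each kept pixel character during one streaming pass over the art.
import Mathlib
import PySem

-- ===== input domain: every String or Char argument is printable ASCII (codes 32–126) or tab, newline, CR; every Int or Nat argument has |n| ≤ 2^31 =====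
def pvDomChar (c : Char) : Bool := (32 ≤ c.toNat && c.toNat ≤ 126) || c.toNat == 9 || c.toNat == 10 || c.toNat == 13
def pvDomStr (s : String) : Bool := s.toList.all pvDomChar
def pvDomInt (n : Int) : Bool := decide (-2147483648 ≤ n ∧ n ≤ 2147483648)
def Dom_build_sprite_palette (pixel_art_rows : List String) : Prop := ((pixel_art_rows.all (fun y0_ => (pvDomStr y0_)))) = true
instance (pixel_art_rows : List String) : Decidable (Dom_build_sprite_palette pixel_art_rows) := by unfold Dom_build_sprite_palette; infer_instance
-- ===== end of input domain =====

-- B replaces A's collect-colors-into-a-set-then-sort pipeline by an online ordered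
-- insertion (with equality skip) into a duplicate-free ascending tail during one
-- streaming pass over the art (objective: alternative).

-- ===== PORT A =====
-- the module constant color_map (tuples become List Int; the transparent entry is a 4-list)
def pvColorMap : PySem.Dict Char (List Int) := PySem.Dict.ofList
  [('R', [224, 0, 0]), ('B', [0, 100, 224]), ('Y', [255, 255, 0]), ('G', [0, 160, 0]),
   ('W', [255, 255, 255]), ('K', [0, 0, 0]), ('S', [255, 184, 152]), ('N', [160, 82, 45]),
   ('n', [120, 60, 30]), ('O', [255, 165, 0]), ('o', [220, 120, 0]), ('C', [90, 200, 255]),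
   ('M', [200, 70, 70]), ('F', [255, 100, 0]), ('L', [100, 200, 50]), ('X', [150, 150, 150]),
   ('D', [50, 50, 50]), ('E', [230, 230, 50]), ('T', [1, 2, 3, 0])]

-- A's sort key lambda c: (c[0], c[1], c[2]): Python compares these int triples lexicographically.
-- Hand-ported (PySem has no 3-tuple keys) as the packed integer c[0]·2^32 + c[1]·2^16 + c[2], which
-- realizes exactly that order on the values actually sorted here — every element of the set is a
-- color of the fixed color_map, with components in 0..255 < 2^16. c[i] via pyGetD (exact here:
-- every color in the set has length 3, so Python's c[i] never raises).
def pvKeyA (c : List Int) : Int :=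
  (PySem.List.pyGetD c 0 0) * 4294967296 + (PySem.List.pyGetD c 1 0) * 65536 + PySem.List.pyGetD c 2 0

def build_sprite_palette (pixel_art_rows : List String) : List (List Int) :=
  let palette : List (List Int) := [PySem.Dict.getD pvColorMap 'T' []]
  let unique_colors_in_art : PySem.Set (List Int) :=
    pixel_art_rows.foldl (fun s row_str =>
      row_str.toList.foldl (fun s char_code =>
        if char_code ≠ 'T' ∧ PySem.Dict.contains pvColorMap char_code = true
        then PySem.Set.add s (PySem.Dict.getD pvColorMap char_code [])
        else s) s) PySem.Set.empty
  (PySem.List.sorted unique_colors_in_art pvKeyA).foldl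
    (fun pal color => if color ∉ pal then pal ++ [color] else pal) palette

-- ===== PORT B =====
-- Python's '<' / '==' on int tuples: lexicographic comparison with length tiebreak
-- (hand-ported; exact for lists of Ints, which is all B compares).
def pvLexLt : List Int → List Int → Bool
  | [], [] => false
  | [], _ :: _ => true
  | _ :: _, [] => false
  | a :: as, b :: bs => if a < b then true else if b < a then false else pvLexLt as bs

-- Source B's _insert_unique: insert col into an ascending duplicate-free list, keeping it so
def pvInsertUnique : List (List Int) → List Int → List (List Int)
  | [], col => [col]
  | head :: rest, col =>
      if pvLexLt col head then col :: head :: rest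
      else if col = head then head :: rest
      else head :: pvInsertUnique rest col

def build_sprite_palette_alt (pixel_art_rows : List String) : List (List Int) :=
  let tail : List (List Int) :=
    pixel_art_rows.foldl (fun t row_str =>
      row_str.toList.foldl (fun t char_code =>
        if char_code ≠ 'T' ∧ PySem.Dict.contains pvColorMap char_code = true
        then pvInsertUnique t (PySem.Dict.getD pvColorMap char_code [])
        else t) t) []
  [PySem.Dict.getD pvColorMap 'T' []] ++ tail

-- ===== PRECONDITION & SPEC =====
def Spec_build_sprite_palette (pixel_art_rows : List String) (out : List (List Int)) : Prop := out = build_sprite_palette_alt pixel_art_rows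
instance (pixel_art_rows : List String) (out : List (List Int)) : Decidable (Spec_build_sprite_palette pixel_art_rows out) := by unfold Spec_build_sprite_palette; infer_instance

-- ===== CLAIM (what is proved, stated in full; the proofs are below) =====
def Claim_equal_build_sprite_palette : Prop := ∀ (pixel_art_rows : List String), Dom_build_sprite_palette pixel_art_rows → Spec_build_sprite_palette pixel_art_rows (build_sprite_palette pixel_art_rows)

-- ===== LEMMAS AND PROOFS =====

-- the 18 non-transparent colors of the fixed color_map, as a literal
def pvColors18 : List (List Int) :=
  [[224, 0, 0], [0, 100, 224], [255, 255, 0], [0, 160, 0], [255, 255, 255], [0, 0, 0],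
   [255, 184, 152], [160, 82, 45], [120, 60, 30], [255, 165, 0], [220, 120, 0],
   [90, 200, 255], [200, 70, 70], [255, 100, 0], [100, 200, 50], [150, 150, 150],
   [50, 50, 50], [230, 230, 50]]

-- the characters of one art row that both programs keep, mapped to their colors
def pvRowColors (row : String) : List (List Int) :=
  (row.toList.filter (fun c => decide (c ≠ 'T' ∧ PySem.Dict.contains pvColorMap c = true))).map
    (fun c => PySem.Dict.getD pvColorMap c [])

theorem rowColors_mem18 (row : String) : ∀ x ∈ pvRowColors row, x ∈ pvColors18 := by
  intro x hx
  simp only [pvRowColors, List.mem_map, List.mem_filter, decide_eq_true_eq] at hx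
  obtain ⟨c, ⟨_, hT, hcont⟩, rfl⟩ := hx
  rw [PySem.Dict.contains_iff_mem_keys] at hcont
  have hk : PySem.Dict.keys pvColorMap
      = ['R', 'B', 'Y', 'G', 'W', 'K', 'S', 'N', 'n', 'O', 'o', 'C', 'M', 'F', 'L', 'X', 'D', 'E', 'T'] := by
    decide
  rw [hk] at hcont
  simp only [List.mem_cons, List.not_mem_nil, or_false] at hcont
  rcases hcont with rfl|rfl|rfl|rfl|rfl|rfl|rfl|rfl|rfl|rfl|rfl|rfl|rfl|rfl|rfl|rfl|rfl|rfl|rfl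
  all_goals first | decide | exact absurd rfl hT

-- A's color-collecting double fold, flattened
theorem colors_fold_eq (rows : List String) (s : PySem.Set (List Int)) :
    rows.foldl (fun s row_str =>
      row_str.toList.foldl (fun s char_code =>
        if char_code ≠ 'T' ∧ PySem.Dict.contains pvColorMap char_code = true
        then PySem.Set.add s (PySem.Dict.getD pvColorMap char_code [])
        else s) s) s
    = PySem.Set.update s (rows.flatMap pvRowColors) := by
  induction rows generalizing s with
  | nil => rfl
  | cons r t ih =>
      simp only [List.foldl_cons, List.flatMap_cons]
      rw [ih, PySem.List.foldl_ite_eq_foldl_filter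
            (p := fun c => c ≠ 'T' ∧ PySem.Dict.contains pvColorMap c = true),
          ← PySem.Set.update_map_eq_foldl_add]
      show _ = PySem.Set.update s (pvRowColors r ++ t.flatMap pvRowColors)
      simp only [PySem.Set.update, List.foldl_append]
      rfl

-- B's insertion double fold, flattened the same way
theorem insert_fold_eq (rows : List String) (t0 : List (List Int)) :
    rows.foldl (fun t row_str =>
      row_str.toList.foldl (fun t char_code =>
        if char_code ≠ 'T' ∧ PySem.Dict.contains pvColorMap char_code = true
        then pvInsertUnique t (PySem.Dict.getD pvColorMap char_code [])
        else t) t) t0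
    = (rows.flatMap pvRowColors).foldl pvInsertUnique t0 := by
  induction rows generalizing t0 with
  | nil => rfl
  | cons r t ih =>
      simp only [List.foldl_cons, List.flatMap_cons, List.foldl_append]
      rw [ih, PySem.List.foldl_ite_eq_foldl_filter
            (p := fun c => c ≠ 'T' ∧ PySem.Dict.contains pvColorMap c = true)]
      simp only [pvRowColors, List.foldl_map]

-- basic facts about the lexicographic comparison
theorem lexLt_irrefl : ∀ a : List Int, pvLexLt a a = false := by
  intro a; induction a with
  | nil => rfl
  | cons x t ih => simp [pvLexLt, ih]

theorem lexLt_ne {a b : List Int} (h : pvLexLt a b = true) : a ≠ b := by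
  intro he; rw [he, lexLt_irrefl] at h; exact Bool.noConfusion h

theorem lexLt_cons_iff (a b : Int) (as bs : List Int) :
    pvLexLt (a :: as) (b :: bs) = true ↔ a < b ∨ (a = b ∧ pvLexLt as bs = true) := by
  simp only [pvLexLt]
  split_ifs with h1 h2
  · simp [h1]
  · simp only [false_iff]
    rintro (h | ⟨rfl, _⟩) <;> omega
  · have hab : a = b := by omega
    simp [hab]

theorem lexLt_trichotomy : ∀ a b : List Int,
    pvLexLt a b = true ∨ a = b ∨ pvLexLt b a = true := by
  intro a
  induction a with
  | nil =>
      intro b; cases b with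
      | nil => exact Or.inr (Or.inl rfl)
      | cons y bs => exact Or.inl rfl
  | cons x as ih =>
      intro b; cases b with
      | nil => exact Or.inr (Or.inr rfl)
      | cons y bs =>
          rcases lt_trichotomy x y with h|h|h
          · left; exact (lexLt_cons_iff _ _ _ _).mpr (Or.inl h)
          · subst h
            rcases ih bs with h2|h2|h2
            · left; exact (lexLt_cons_iff _ _ _ _).mpr (Or.inr ⟨rfl, h2⟩)
            · exact Or.inr (Or.inl (by rw [h2]))
            · right; right; exact (lexLt_cons_iff _ _ _ _).mpr (Or.inr ⟨rfl, h2⟩)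
          · right; right; exact (lexLt_cons_iff _ _ _ _).mpr (Or.inl h)

theorem lexLt_trans : ∀ a b c : List Int,
    pvLexLt a b = true → pvLexLt b c = true → pvLexLt a c = true := by
  intro a
  induction a with
  | nil =>
      intro b c hab hbc
      cases b with
      | nil => exact hbc
      | cons y bs => cases c with
          | nil => exact absurd hbc (by simp [pvLexLt])
          | cons z cs => rfl
  | cons x as ih =>
      intro b c hab hbc
      cases b with
      | nil => exact absurd hab (by simp [pvLexLt])
      | cons y bs =>
          cases c with
          | nil => exact absurd hbc (by simp [pvLexLt])
          | cons z cs =>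
              rcases (lexLt_cons_iff _ _ _ _).mp hab with h1|⟨rfl, h1⟩ <;>
                rcases (lexLt_cons_iff _ _ _ _).mp hbc with h2|⟨rfl, h2⟩
              · exact (lexLt_cons_iff _ _ _ _).mpr (Or.inl (lt_trans h1 h2))
              · exact (lexLt_cons_iff _ _ _ _).mpr (Or.inl h1)
              · exact (lexLt_cons_iff _ _ _ _).mpr (Or.inl h2)
              · exact (lexLt_cons_iff _ _ _ _).mpr (Or.inr ⟨rfl, ih bs cs h1 h2⟩)

-- on the colors of the fixed map, pvLexLt agrees with A s packed sort key
theorem lexLt_key : ∀ a ∈ pvColors18, ∀ b ∈ pvColors18,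
    pvLexLt a b = true → pvKeyA a < pvKeyA b := by decide

-- membership through pvInsertUnique
theorem mem_insertUnique (t : List (List Int)) (col x : List Int) :
    x ∈ pvInsertUnique t col ↔ x = col ∨ x ∈ t := by
  induction t with
  | nil => simp [pvInsertUnique]
  | cons h rest ih =>
      by_cases h1 : pvLexLt col h = true
      · rw [pvInsertUnique, if_pos h1]; simp only [List.mem_cons]; try tauto
      · by_cases h2 : col = h
        · subst h2
          rw [pvInsertUnique, if_neg h1, if_pos rfl]
          simp only [List.mem_cons]; try tauto
        · rw [pvInsertUnique, if_neg h1, if_neg h2]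
          simp only [List.mem_cons, ih]; try tauto

-- pvInsertUnique keeps the list strictly ascending
theorem pairwise_insertUnique (t : List (List Int)) (col : List Int)
    (hp : t.Pairwise (fun a b => pvLexLt a b = true)) :
    (pvInsertUnique t col).Pairwise (fun a b => pvLexLt a b = true) := by
  induction t with
  | nil => simp [pvInsertUnique]
  | cons h rest ih =>
      rw [List.pairwise_cons] at hp
      by_cases h1 : pvLexLt col h = true
      · rw [pvInsertUnique, if_pos h1, List.pairwise_cons]
        refine ⟨?_, List.pairwise_cons.mpr hp⟩
        intro b hb
        rcases List.mem_cons.mp hb with rfl|hb2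
        · exact h1
        · exact lexLt_trans col h b h1 (hp.1 b hb2)
      · by_cases h2 : col = h
        · subst h2
          rw [pvInsertUnique, if_neg h1, if_pos rfl]
          exact List.pairwise_cons.mpr hp
        · have hcl : pvLexLt h col = true := by
            rcases lexLt_trichotomy col h with hc|hc|hc
            · exact absurd hc h1
            · exact absurd hc h2
            · exact hc
          rw [pvInsertUnique, if_neg h1, if_neg h2, List.pairwise_cons]
          refine ⟨?_, ih hp.2⟩
          intro b hb
          rcases (mem_insertUnique rest col b).mp hb with rfl|hb2
          · exact hcl
          · exact hp.1 b hb2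

-- B s accumulating fold: membership and sortedness
theorem foldl_insert_mem (cs : List (List Int)) (t : List (List Int)) (x : List Int) :
    x ∈ cs.foldl pvInsertUnique t ↔ x ∈ cs ∨ x ∈ t := by
  induction cs generalizing t with
  | nil => simp
  | cons c cs ih =>
      simp only [List.foldl_cons, ih, mem_insertUnique, List.mem_cons]
      tauto

theorem foldl_insert_pairwise (cs : List (List Int)) (t : List (List Int))
    (hp : t.Pairwise (fun a b => pvLexLt a b = true)) :
    (cs.foldl pvInsertUnique t).Pairwise (fun a b => pvLexLt a b = true) := by
  induction cs generalizing t with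
  | nil => exact hp
  | cons c cs ih => exact ih _ (pairwise_insertUnique t c hp)

-- A s append-into-palette loop on a duplicate-free list of colors not yet in the palette
theorem foldl_palette_append (l acc : List (List Int)) (hnd : l.Nodup)
    (hdisj : ∀ x ∈ l, x ∉ acc) :
    l.foldl (fun pal color => if color ∉ pal then pal ++ [color] else pal) acc = acc ++ l := by
  induction l generalizing acc with
  | nil => simp
  | cons x t ih =>
      have hstep := ih (acc ++ [x]) (List.Nodup.of_cons hnd) (fun y hy => by
        simp only [List.mem_append, List.mem_singleton, not_or]
        exact ⟨hdisj y (List.mem_cons_of_mem _ hy),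
          fun he => (List.nodup_cons.mp hnd).1 (he ▸ hy)⟩)
      simp only [List.foldl_cons, if_pos (hdisj x List.mem_cons_self), hstep]
      simp

theorem colors18_not_transparent : ∀ x ∈ pvColors18, x ≠ [1, 2, 3, 0] := by decide

-- ===== VERDICT (by name: the statement is the Claim_ definition above) =====
theorem build_sprite_palette_spec : Claim_equal_build_sprite_palette := by
  intro rows _
  show build_sprite_palette rows = build_sprite_palette_alt rows
  have hup : ∀ {α : Type} [BEq α] (xs : List α),
      PySem.Set.update PySem.Set.empty xs = PySem.Set.ofList xs := fun xs => rfl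
  have ht : PySem.Dict.getD pvColorMap 'T' [] = [1, 2, 3, 0] := by decide
  unfold build_sprite_palette build_sprite_palette_alt
  simp only [colors_fold_eq, insert_fold_eq, hup, ht]
  set cs := rows.flatMap pvRowColors with hcs
  set F := cs.foldl pvInsertUnique [] with hF
  have hFp : F.Pairwise (fun a b => pvLexLt a b = true) :=
    foldl_insert_pairwise cs [] List.Pairwise.nil
  have hFmem : ∀ x ∈ F, x ∈ pvColors18 := by
    intro x hx
    rcases (foldl_insert_mem cs [] x).mp hx with hx2|hx2
    · rw [hcs] at hx2
      obtain ⟨r, hr, hxr⟩ := List.mem_flatMap.mp hx2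
      exact rowColors_mem18 r x hxr
    · exact absurd hx2 (List.not_mem_nil)
  have hFnd : F.Nodup := hFp.imp (fun h => lexLt_ne h)
  have hsorted : PySem.List.sorted (PySem.Set.ofList cs) pvKeyA = F := by
    apply PySem.List.sorted_eq_of_perm_of_pairwise_lt
    · rw [List.perm_ext_iff_of_nodup hFnd (PySem.Set.nodup_ofList _)]
      intro x
      rw [foldl_insert_mem, PySem.Set.mem_ofList]
      simp
    · exact hFp.imp_of_mem (fun ha hb h => lexLt_key _ (hFmem _ ha) _ (hFmem _ hb) h)
  rw [hsorted, foldl_palette_append F _ hFnd (by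
    intro x hx
    simp only [List.mem_singleton]
    exact colors18_not_transparent x (hFmem x hx))]
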